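-- pv_equiv track=rewrite | github.com/navmou/lunar_lander | logic.py | vertical_minus
-- ===== SOURCE A (Python) =====
-- def vertical_minus(board , player , x , y , rewards):
--     if x < 7:
--         if board[x+1][y] == -player:
--             rewards+=1
--             return vertical_minus(board,player,x+1,y,rewards)
--         elif board[x+1][y] == player:
--             return False , 0 , (x,y)
--         elif board[x+1][y] == 0:
--             if rewards != 0:
--                 return True , rewards , (x+1,y)
--             else:
--                 return False , 0 , (x,y)
--     else:
--         return False , 0 , (x,y)
-- ===== SOURCE B (Python) =====
-- def vertical_minus(board, player, x, y, rewards):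
--     # Iterative: skip the run of opponent pieces below (x, y), then decide once.
--     while x < 7 and board[x + 1][y] == -player:
--         rewards += 1
--         x += 1
--     if x < 7 and board[x + 1][y] == 0 and rewards != 0:
--         return True, rewards, (x + 1, y)
--     return False, 0, (x, y)
-- ===== Notes on version B (the rewrite author's own statement) =====
-- stated objective: simpler
-- what changed: Replaces A's self-recursion (one stack frame per captured piece) by a single iterative while-loop that skips the run of opponent pieces and then decides the result with one final check; Pre_ excludes inputs where A raises IndexError or falls through to an implicit None (a scanned cell outside {-player, player, 0}), where B returns a normal tuple.
-- outside the precondition, e.g. on vertical_minus([[0, -1], [6, 2]], 0, 0, 0, 0): A returns None, B returns (False, 0, (0, 0))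
import Mathlib
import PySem

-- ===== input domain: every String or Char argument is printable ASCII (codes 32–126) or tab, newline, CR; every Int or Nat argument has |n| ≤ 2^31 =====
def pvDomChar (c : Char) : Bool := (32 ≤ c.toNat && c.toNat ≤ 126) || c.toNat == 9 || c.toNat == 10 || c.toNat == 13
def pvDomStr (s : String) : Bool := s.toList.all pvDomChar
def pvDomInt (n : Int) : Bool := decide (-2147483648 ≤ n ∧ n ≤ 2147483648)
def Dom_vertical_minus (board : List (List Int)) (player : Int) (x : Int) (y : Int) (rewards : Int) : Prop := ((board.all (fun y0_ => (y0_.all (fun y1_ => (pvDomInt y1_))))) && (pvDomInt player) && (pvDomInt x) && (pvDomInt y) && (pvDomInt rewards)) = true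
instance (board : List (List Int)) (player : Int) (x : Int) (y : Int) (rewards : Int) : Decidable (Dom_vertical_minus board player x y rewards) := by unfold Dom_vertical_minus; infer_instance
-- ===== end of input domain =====

-- B replaces A's one-stack-frame-per-piece recursion by a single while-loop (skip the run of
-- opponent pieces, then one final check); objective: simpler. Return values only (no mutation).

-- board[j][y] with Python indexing semantics (negative wraparound, none = IndexError)
def pvCell (board : List (List Int)) (y j : Int) : Option Int :=
  (PySem.List.pyGet? board j).bind (fun row => PySem.List.pyGet? row y)

-- ===== PORT A =====
def vertical_minus (board : List (List Int)) (player : Int) (x : Int) (y : Int) (rewards : Int) : Bool × Int × (Int × Int) :=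
  if x < 7 then
    match pvCell board y (x + 1) with
    | some c =>
      if c = -player then vertical_minus board player (x + 1) y (rewards + 1)
      else if c = player then (false, 0, (x, y))
      else if c = 0 then
        (if rewards ≠ 0 then (true, rewards, (x + 1, y)) else (false, 0, (x, y)))
      else (false, 0, (x, y))   -- Python falls through returning None here: excluded by Pre_
    | none => (false, 0, (x, y))  -- Python raises IndexError here: excluded by Pre_
  else (false, 0, (x, y))
termination_by (7 - x).toNat
decreasing_by omega

-- ===== PORT B =====
-- the while-loop of Source B: skip the run of cells equal to -player, returning the final (x, rewards)
def pvSkip (board : List (List Int)) (player : Int) (y : Int) (x : Int) (rewards : Int) : Int × Int :=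
  if x < 7 ∧ pvCell board y (x + 1) = some (-player) then
    pvSkip board player y (x + 1) (rewards + 1)
  else (x, rewards)
termination_by (7 - x).toNat
decreasing_by omega

def vertical_minus_alt (board : List (List Int)) (player : Int) (x : Int) (y : Int) (rewards : Int) : Bool × Int × (Int × Int) :=
  let p := pvSkip board player y x rewards
  if p.1 < 7 ∧ pvCell board y (p.1 + 1) = some 0 ∧ p.2 ≠ 0 then (true, p.2, (p.1 + 1, y))
  else (false, 0, (p.1, y))

-- ===== PRECONDITION & SPEC =====
-- Pre_ excludes exactly the inputs on which A does not return a tuple: an IndexError while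
-- scanning down the column, or the implicit None fall-through when a scanned cell is not
-- in {-player, player, 0}.
def Pre_vertical_minus (board : List (List Int)) (player : Int) (x : Int) (y : Int) (rewards : Int) : Prop :=
  (x < 7 → -(board.length : Int) ≤ x + 1) ∧
  ∀ j ∈ PySem.List.pyRange (x + 1) 8 1,
    (∀ i ∈ PySem.List.pyRange (x + 1) 8 1, i < j → pvCell board y i = some (-player)) →
    (pvCell board y j = some (-player) ∨ pvCell board y j = some player ∨ pvCell board y j = some 0)
instance (board : List (List Int)) (player : Int) (x : Int) (y : Int) (rewards : Int) : Decidable (Pre_vertical_minus board player x y rewards) := by unfold Pre_vertical_minus; infer_instance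

def pvWitness_vertical_minus : List (List Int) × Int × Int × Int × Int :=
  ([[0, 0], [-1, 0], [-1, 0], [-1, 0], [1, 0], [0, 0], [0, 0], [0, 0]], 1, 0, 0, 0)

def Spec_vertical_minus (board : List (List Int)) (player : Int) (x : Int) (y : Int) (rewards : Int) (out : Bool × Int × (Int × Int)) : Prop := out = vertical_minus_alt board player x y rewards
instance (board : List (List Int)) (player : Int) (x : Int) (y : Int) (rewards : Int) (out : Bool × Int × (Int × Int)) : Decidable (Spec_vertical_minus board player x y rewards out) := by unfold Spec_vertical_minus; infer_instance

-- ===== CLAIM (what is proved, stated in full; the proofs are below) =====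
def Claim_equal_vertical_minus : Prop := ∀ (board : List (List Int)) (player : Int) (x : Int) (y : Int) (rewards : Int), Dom_vertical_minus board player x y rewards → Pre_vertical_minus board player x y rewards → Spec_vertical_minus board player x y rewards (vertical_minus board player x y rewards)

-- ===== LEMMAS AND PROOFS =====

-- Pre_ at x together with "the cell below is an opponent piece" yields Pre_ one row down.
lemma pre_step (board : List (List Int)) (player x y rewards rewards' : Int)
    (h : Pre_vertical_minus board player x y rewards)
    (hc : pvCell board y (x + 1) = some (-player)) :
    Pre_vertical_minus board player (x + 1) y rewards' := by
  obtain ⟨hb, h⟩ := h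
  refine ⟨fun _ => le_trans (hb (by omega)) (by omega), ?_⟩
  intro j hj hprem
  rw [PySem.List.mem_pyRange_one] at hj
  apply h j (by rw [PySem.List.mem_pyRange_one]; omega)
  intro i hi hij
  rw [PySem.List.mem_pyRange_one] at hi
  by_cases hix : i = x + 1
  · simpa [hix] using hc
  · exact hprem i (by rw [PySem.List.mem_pyRange_one]; omega) hij

-- Pre_ at x with x < 7 makes the cell below legal: it is -player, player or 0.
lemma pre_head (board : List (List Int)) (player x y rewards : Int)
    (h : Pre_vertical_minus board player x y rewards) (hx : x < 7) :
    pvCell board y (x + 1) = some (-player) ∨ pvCell board y (x + 1) = some player ∨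
      pvCell board y (x + 1) = some 0 := by
  apply h.2 (x + 1) (by rw [PySem.List.mem_pyRange_one]; omega)
  intro i hi hij
  rw [PySem.List.mem_pyRange_one] at hi
  omega

lemma main_lemma (board : List (List Int)) (player y : Int) :
    ∀ n (x rewards : Int), (7 - x).toNat = n →
      Pre_vertical_minus board player x y rewards →
      vertical_minus board player x y rewards = vertical_minus_alt board player x y rewards := by
  intro n
  induction n with
  | zero =>
    intro x rewards hn _
    have hx : ¬ x < 7 := by omega
    rw [vertical_minus, vertical_minus_alt, pvSkip]
    simp [hx]
  | succ n ih =>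
    intro x rewards hn hpre
    by_cases hx : x < 7
    · by_cases hc1 : pvCell board y (x + 1) = some (-player)
      · -- opponent piece: both sides step down one row
        have hA : vertical_minus board player x y rewards
            = vertical_minus board player (x + 1) y (rewards + 1) := by
          rw [vertical_minus]; simp [hx, hc1]
        have hB : vertical_minus_alt board player x y rewards
            = vertical_minus_alt board player (x + 1) y (rewards + 1) := by
          unfold vertical_minus_alt
          rw [pvSkip]; simp [hx, hc1]
        rw [hA, hB]
        exact ih (x + 1) (rewards + 1) (by omega)
          (pre_step board player x y rewards (rewards + 1) hpre hc1)
      · have hp0 : player ≠ 0 := by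
          intro h0
          rcases pre_head board player x y rewards hpre hx with hc | hc | hc <;>
            exact hc1 (by simpa [h0] using hc)
        rcases pre_head board player x y rewards hpre hx with hc | hc | hc
        · exact absurd hc hc1
        · -- own piece blocks: both return (false, 0, (x, y))
          have hA : vertical_minus board player x y rewards = (false, 0, (x, y)) := by
            rw [vertical_minus]
            have hne : ¬ (player = -player) := by omega
            simp [hx, hc, hne]
          have hskip : pvSkip board player y x rewards = (x, rewards) := by
            rw [pvSkip]; simp [hc1]
          have hB : vertical_minus_alt board player x y rewards = (false, 0, (x, y)) := by
            unfold vertical_minus_alt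
            rw [hskip]
            simp [hc, hp0]
          rw [hA, hB]
        · -- empty cell: capture iff rewards ≠ 0
          have hne : (0 : Int) ≠ -player := by omega
          have hnep : (0 : Int) ≠ player := by omega
          have hA : vertical_minus board player x y rewards
              = (if rewards ≠ 0 then (true, rewards, (x + 1, y)) else (false, 0, (x, y))) := by
            rw [vertical_minus]
            simp [hx, hc, hne, hnep]
          have hB : vertical_minus_alt board player x y rewards
              = (if rewards ≠ 0 then (true, rewards, (x + 1, y)) else (false, 0, (x, y))) := by
            have hskip : pvSkip board player y x rewards = (x, rewards) := by
              rw [pvSkip]; simp [hc1]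
            unfold vertical_minus_alt
            rw [hskip]
            by_cases hr : rewards = 0 <;> simp [hc, hx, hr]
          rw [hA, hB]
    · rw [vertical_minus, vertical_minus_alt, pvSkip]
      simp [hx]

-- ===== VERDICT (by name: the statement is the Claim_ definition above) =====
theorem vertical_minus_spec : Claim_equal_vertical_minus := by
  intro board player x y rewards _ hpre
  unfold Spec_vertical_minus
  exact main_lemma board player y (7 - x).toNat x rewards rfl hpre
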